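-- pv_equiv track=rewrite | github.com/Agathe48/robot_mission_3 | agents.py | find_best_rows_to_cover
-- ===== SOURCE A (Python) =====
-- def find_best_rows_to_cover(agent_position, rows_being_covered):
--     """
--     Find the best row to cover for the agent.
--
--     Parameters
--     ----------
--     agent_position : tuple
--         The position of the agent in the grid.
--
--     rows_being_covered : list
--         A list of the rows being covered in the grid.
--
--     Returns
--     -------
--     id_row_to_go : int
--         The id of the row to cover.
--     """
--     grid_height = len(rows_being_covered)
--     # First start to cover the extremities
--     if rows_being_covered[1] == 0 and rows_being_covered[grid_height-2] == 0:
--         # The agent is in the upper part of the screen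
--         if agent_position[1] > grid_height//2:
--             return grid_height - 2
--         # The agent is in the upper part of the screen
--         else:
--             return 1
--     elif rows_being_covered[1] == 0:
--         return 1
--     elif rows_being_covered[grid_height - 2] == 0:
--         return grid_height - 2
--
--     # Cover when there are three rows adjacent not covered
--     for counter in range(1, grid_height-1):
--         if rows_being_covered[counter-1] == 0 and rows_being_covered[counter] == 0 and rows_being_covered[counter+1] == 0:
--             return counter
--
--     # Cover when there are two rows adjacent not covered
--     for counter in range(1, grid_height-1):
--         if (rows_being_covered[counter-1] == 0 and rows_being_covered[counter] == 0) or (rows_being_covered[counter+1] == 0 and rows_being_covered[counter] == 0):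
--             return counter
--
--     # Cover the single row not covered
--     for counter in range(1, grid_height-1):
--         if rows_being_covered[counter] == 0:
--             return counter
-- ===== SOURCE B (Python) =====
-- def find_best_rows_to_cover(agent_position, rows_being_covered):
--     grid_height = len(rows_being_covered)
--     # First start to cover the extremities (guard block kept as in A)
--     if rows_being_covered[1] == 0 and rows_being_covered[grid_height-2] == 0:
--         if agent_position[1] > grid_height//2:
--             return grid_height - 2
--         else:
--             return 1
--     elif rows_being_covered[1] == 0:
--         return 1
--     elif rows_being_covered[grid_height - 2] == 0:
--         return grid_height - 2
--
--     # One pass: record the first index of each priority category.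
--     three = two = single = None
--     for counter in range(1, grid_height-1):
--         left = rows_being_covered[counter-1] == 0
--         mid = rows_being_covered[counter] == 0
--         right = rows_being_covered[counter+1] == 0
--         if three is None and left and mid and right:
--             three = counter
--         if two is None and ((left and mid) or (right and mid)):
--             two = counter
--         if single is None and mid:
--             single = counter
--     return three if three is not None else two if two is not None else single
-- ===== Notes on version B (the rewrite author's own statement) =====
-- stated objective: alternative
-- what changed: A's three sequential priority scans over the interior rows are replaced by a single pass that records the first index of each of the three categories and combines them by priority after the loop.
import Mathlib
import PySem

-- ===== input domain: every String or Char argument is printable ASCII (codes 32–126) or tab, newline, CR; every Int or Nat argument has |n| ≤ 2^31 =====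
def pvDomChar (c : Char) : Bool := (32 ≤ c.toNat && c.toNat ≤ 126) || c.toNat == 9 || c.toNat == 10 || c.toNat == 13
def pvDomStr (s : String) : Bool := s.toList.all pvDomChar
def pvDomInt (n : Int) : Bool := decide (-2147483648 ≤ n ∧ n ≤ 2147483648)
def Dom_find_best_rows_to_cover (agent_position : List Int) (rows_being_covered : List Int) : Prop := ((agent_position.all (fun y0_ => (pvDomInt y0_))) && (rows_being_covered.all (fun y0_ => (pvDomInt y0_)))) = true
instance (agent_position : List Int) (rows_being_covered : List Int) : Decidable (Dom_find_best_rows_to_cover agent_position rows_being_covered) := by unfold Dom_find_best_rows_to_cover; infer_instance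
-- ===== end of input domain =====

-- B merges A's three sequential priority scans into one pass that records the first
-- index of each category and combines them by priority afterwards (alternative, same cost).


-- ===== PORT A =====
-- rows[i] == 0 (exact on Pre_, where every index used is in range)
def zeroA (rows : List Int) (i : Int) : Bool := PySem.List.pyGet? rows i == some 0

-- 'for counter in range(1, gh-1): if rows[c-1]==0 and rows[c]==0 and rows[c+1]==0: return c'
def loopA3 (rows : List Int) : List Int → Option Int
  | [] => none
  | c :: rest =>
    if zeroA rows (c-1) && zeroA rows c && zeroA rows (c+1) then some c
    else loopA3 rows rest

-- the two-adjacent scan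
def loopA2 (rows : List Int) : List Int → Option Int
  | [] => none
  | c :: rest =>
    if (zeroA rows (c-1) && zeroA rows c) || (zeroA rows (c+1) && zeroA rows c) then some c
    else loopA2 rows rest

-- the single-row scan
def loopA1 (rows : List Int) : List Int → Option Int
  | [] => none
  | c :: rest => if zeroA rows c then some c else loopA1 rows rest

def find_best_rows_to_cover (agent_position : List Int) (rows_being_covered : List Int) : Option Int :=
  let gh : Int := rows_being_covered.length
  if zeroA rows_being_covered 1 && zeroA rows_being_covered (gh-2) then
    match PySem.List.pyGet? agent_position 1 with
    | some a1 => if a1 > PySem.Int.floordiv gh 2 then some (gh - 2) else some 1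
    | none => none          -- Python raises here; excluded by Pre_
  else if zeroA rows_being_covered 1 then some 1
  else if zeroA rows_being_covered (gh-2) then some (gh - 2)
  else
    let idxs := PySem.List.pyRange 1 (gh-1) 1
    match loopA3 rows_being_covered idxs with
    | some c => some c
    | none =>
      match loopA2 rows_being_covered idxs with
      | some c => some c
      | none => loopA1 rows_being_covered idxs

-- ===== PORT B =====
def zeroB (rows : List Int) (i : Int) : Bool := PySem.List.pyGet? rows i == some 0

-- one pass recording the first index of each category (three, two, single)
def scanB (rows : List Int) : List Int → Option Int × Option Int × Option Int → Option Int × Option Int × Option Int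
  | [], acc => acc
  | c :: rest, (three, two, single) =>
    let left := zeroB rows (c-1)
    let mid := zeroB rows c
    let right := zeroB rows (c+1)
    scanB rows rest
      ((if three.isNone && (left && mid && right) then some c else three),
       (if two.isNone && ((left && mid) || (right && mid)) then some c else two),
       (if single.isNone && mid then some c else single))

def find_best_rows_to_cover_alt (agent_position : List Int) (rows_being_covered : List Int) : Option Int :=
  let gh : Int := rows_being_covered.length
  if zeroB rows_being_covered 1 && zeroB rows_being_covered (gh-2) then
    match PySem.List.pyGet? agent_position 1 with
    | some a1 => if a1 > PySem.Int.floordiv gh 2 then some (gh - 2) else some 1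
    | none => none          -- Python raises here; excluded by Pre_
  else if zeroB rows_being_covered 1 then some 1
  else if zeroB rows_being_covered (gh-2) then some (gh - 2)
  else
    match scanB rows_being_covered (PySem.List.pyRange 1 (gh-1) 1) (none, none, none) with
    | (three, two, single) => (three.orElse (fun _ => two)).orElse (fun _ => single)

-- ===== PRECONDITION & SPEC =====
-- Pre_ excludes exactly the inputs where Python A raises IndexError: fewer than two rows
-- (rows[1]), or a too-short agent_position when the first branch reads agent_position[1].
def Pre_find_best_rows_to_cover (agent_position : List Int) (rows_being_covered : List Int) : Prop :=
  2 ≤ rows_being_covered.length ∧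
  ((rows_being_covered.getD 1 1 = 0 ∧ rows_being_covered.getD (rows_being_covered.length - 2) 1 = 0) →
    2 ≤ agent_position.length)
instance (agent_position : List Int) (rows_being_covered : List Int) : Decidable (Pre_find_best_rows_to_cover agent_position rows_being_covered) := by unfold Pre_find_best_rows_to_cover; infer_instance

def pvWitness_find_best_rows_to_cover : List Int × List Int := ([3, 4], [1, 0, 1, 0, 1])

def Spec_find_best_rows_to_cover (agent_position : List Int) (rows_being_covered : List Int) (out : Option Int) : Prop := out = find_best_rows_to_cover_alt agent_position rows_being_covered
instance (agent_position : List Int) (rows_being_covered : List Int) (out : Option Int) : Decidable (Spec_find_best_rows_to_cover agent_position rows_being_covered out) := by unfold Spec_find_best_rows_to_cover; infer_instance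

-- ===== CLAIM (what is proved, stated in full; the proofs are below) =====
def Claim_equal_find_best_rows_to_cover : Prop := ∀ (agent_position : List Int) (rows_being_covered : List Int), Dom_find_best_rows_to_cover agent_position rows_being_covered → Pre_find_best_rows_to_cover agent_position rows_being_covered → Spec_find_best_rows_to_cover agent_position rows_being_covered (find_best_rows_to_cover agent_position rows_being_covered)

-- ===== LEMMAS AND PROOFS =====
theorem zeroB_eq_zeroA (rows : List Int) (i : Int) : zeroB rows i = zeroA rows i := rfl

-- the one-pass scan computes, componentwise, "accumulator, else first hit of that category"
theorem scanB_spec (rows : List Int) (L : List Int) (a b d : Option Int) :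
    scanB rows L (a, b, d) =
      (a.orElse (fun _ => loopA3 rows L),
       b.orElse (fun _ => loopA2 rows L),
       d.orElse (fun _ => loopA1 rows L)) := by
  induction L generalizing a b d with
  | nil => cases a <;> cases b <;> cases d <;> rfl
  | cons c rest ih =>
    simp only [scanB, loopA3, loopA2, loopA1, zeroB_eq_zeroA, ih]
    cases a <;> cases b <;> cases d <;>
      simp [Option.orElse] <;> split_ifs <;> simp_all [Option.orElse]

-- ===== VERDICT (by name: the statement is the Claim_ definition above) =====
theorem find_best_rows_to_cover_spec : Claim_equal_find_best_rows_to_cover := by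
  intro ap rows _ _
  unfold Spec_find_best_rows_to_cover find_best_rows_to_cover find_best_rows_to_cover_alt
  simp only [zeroB_eq_zeroA, scanB_spec]
  split_ifs <;> try rfl
  cases loopA3 rows (PySem.List.pyRange 1 ((rows.length : Int) - 1) 1) <;>
    cases loopA2 rows (PySem.List.pyRange 1 ((rows.length : Int) - 1) 1) <;>
      simp [Option.orElse]
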